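-- pv_equiv track=rewrite | github.com/xiajohn/pixelpen.net | blogPipeline/blog_reviewer.py | adjust_connectors
-- ===== SOURCE A (Python) =====
-- def adjust_connectors(sentences):
--     connectors = ["Moreover", "Additionally", "Furthermore", "However", "On the other hand", "Consequently", "In contrast"]
--     modified_sentences = []
--     for idx, sent in enumerate(sentences):
--         if idx > 0 and idx % 3 == 0:
--             modified_sentences.append(f"{connectors[idx % len(connectors)]}, {sent}")
--         else:
--             modified_sentences.append(sent)
--     return modified_sentences
-- ===== SOURCE B (Python) =====
-- def adjust_connectors(sentences):
--     connectors = ["Moreover", "Additionally", "Furthermore", "However", "On the other hand", "Consequently", "In contrast"]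
--     out = []
--     for k in range((len(sentences) + 2) // 3):
--         chunk = sentences[3 * k : 3 * k + 3]
--         if k > 0:
--             chunk[0] = f"{connectors[(3 * k) % len(connectors)]}, {chunk[0]}"
--         out += chunk
--     return out
-- ===== Notes on version B (the rewrite author's own statement) =====
-- stated objective: alternative
-- what changed: B replaces A's single enumerate pass with a per-element modulo test by a loop over chunk indices: it slices the input into chunks of three and rewrites only the first sentence of every chunk after the first, keying the connector by 3*k.
import Mathlib
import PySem

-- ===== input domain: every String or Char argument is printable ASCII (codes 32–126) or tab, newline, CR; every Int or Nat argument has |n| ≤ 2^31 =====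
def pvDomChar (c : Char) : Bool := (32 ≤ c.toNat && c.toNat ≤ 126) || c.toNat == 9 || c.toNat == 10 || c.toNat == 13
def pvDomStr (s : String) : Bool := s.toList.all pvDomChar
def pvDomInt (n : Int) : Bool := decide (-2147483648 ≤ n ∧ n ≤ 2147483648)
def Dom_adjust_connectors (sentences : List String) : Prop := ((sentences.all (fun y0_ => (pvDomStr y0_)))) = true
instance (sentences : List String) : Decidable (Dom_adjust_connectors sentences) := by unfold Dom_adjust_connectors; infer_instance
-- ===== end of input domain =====

-- B abandons A's per-element indexed pass: it recurses over the list three sentences at a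
-- time and prefixes only the first sentence of each chunk after the first (no speed claim).

-- ===== PORT A =====
-- literal port of A: enumerate, and append either the prefixed or the plain sentence.
-- connectors[idx % 7] is always in range (0 ≤ idx % 7 < 7), so pyGetD is exact here.
def adjust_connectors (sentences : List String) : List String :=
  let connectors : List String := ["Moreover", "Additionally", "Furthermore", "However", "On the other hand", "Consequently", "In contrast"]
  (PySem.List.enumerate sentences).foldl
    (fun modified_sentences p =>
      if p.1 > 0 ∧ PySem.Int.mod p.1 3 = 0 then
        modified_sentences ++ [PySem.List.pyGetD connectors (PySem.Int.mod p.1 (connectors.length : Int)) "" ++ ", " ++ p.2]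
      else
        modified_sentences ++ [p.2])
    []

-- ===== PORT B =====
-- literal port of Source B: loop k over range((len+2)//3); slice out the k-th chunk of three,
-- for k > 0 rewrite its first element, and extend the output with it. Every chunk in the
-- range is nonempty (3*k < len), so headD "" is exact for chunk[0]; (3*k) % 7 is in range,
-- so pyGetD is exact here.
def adjust_connectors_alt (sentences : List String) : List String :=
  let connectors : List String := ["Moreover", "Additionally", "Furthermore", "However", "On the other hand", "Consequently", "In contrast"]
  (PySem.List.pyRange 0 (PySem.Int.floordiv ((sentences.length : Int) + 2) 3) 1).foldl
    (fun out k =>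
      let chunk := PySem.List.slice sentences (some (3 * k)) (some (3 * k + 3))
      let chunk' :=
        if k > 0 then
          (PySem.List.pyGetD connectors (PySem.Int.mod (3 * k) (connectors.length : Int)) "" ++ ", " ++ chunk.headD "") :: chunk.tail
        else chunk
      out ++ chunk')
    []

-- ===== PRECONDITION & SPEC =====
def Spec_adjust_connectors (sentences : List String) (out : List String) : Prop := out = adjust_connectors_alt sentences
instance (sentences : List String) (out : List String) : Decidable (Spec_adjust_connectors sentences out) := by unfold Spec_adjust_connectors; infer_instance

-- ===== CLAIM (what is proved, stated in full; the proofs are below) =====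
def Claim_equal_adjust_connectors : Prop := ∀ (sentences : List String), Dom_adjust_connectors sentences → Spec_adjust_connectors sentences (adjust_connectors sentences)

-- ===== LEMMAS AND PROOFS =====

-- the connector text attached at (nonneg) index i
def pvConn (i : Int) : String :=
  PySem.List.pyGetD ["Moreover", "Additionally", "Furthermore", "However", "On the other hand", "Consequently", "In contrast"] (PySem.Int.mod i 7) ""

-- A's fold is an append-map
lemma pvA_foldl (l : List (Int × String)) (acc : List String) :
    l.foldl
      (fun modified_sentences p =>
        if p.1 > 0 ∧ PySem.Int.mod p.1 3 = 0 then
          modified_sentences ++ [pvConn p.1 ++ ", " ++ p.2]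
        else
          modified_sentences ++ [p.2])
      acc
    = acc ++ l.map (fun p => if p.1 > 0 ∧ PySem.Int.mod p.1 3 = 0 then pvConn p.1 ++ ", " ++ p.2 else p.2) := by
  induction l generalizing acc with
  | nil => simp
  | cons x xs ih =>
    simp only [List.foldl_cons, List.map_cons]
    split_ifs <;> rw [ih] <;> simp

lemma pvA_eq_map (s : List String) :
    adjust_connectors s =
      (PySem.List.enumerate s).map
        (fun p => if p.1 > 0 ∧ PySem.Int.mod p.1 3 = 0 then pvConn p.1 ++ ", " ++ p.2 else p.2) := by
  show List.foldl
      (fun modified_sentences p =>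
        if p.1 > 0 ∧ PySem.Int.mod p.1 3 = 0 then
          modified_sentences ++ [pvConn p.1 ++ ", " ++ p.2]
        else
          modified_sentences ++ [p.2])
      [] (PySem.List.enumerate s) = _
  rw [pvA_foldl]
  simp

lemma pvA_getElem (s : List String) (j : Nat) :
    (adjust_connectors s)[j]? =
      s[j]?.map (fun t => if (j : Int) > 0 ∧ PySem.Int.mod (j : Int) 3 = 0 then pvConn j ++ ", " ++ t else t) := by
  rw [pvA_eq_map, List.getElem?_map, PySem.List.getElem?_enumerate, Option.map_map]
  refine congrArg (fun f => Option.map f s[j]?) ?_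
  funext x
  simp

-- the k-th (possibly rewritten) chunk of three
def pvG (s : List String) (k : Nat) : List String :=
  let chunk := (s.drop (3 * k)).take 3
  if 0 < k then (pvConn ((3 * k : Nat) : Int) ++ ", " ++ chunk.headD "") :: chunk.tail else chunk

lemma pvB_eq_flatMap (s : List String) :
    adjust_connectors_alt s = (List.range ((s.length + 2) / 3)).flatMap (pvG s) := by
  have hN : PySem.Int.floordiv ((s.length : Int) + 2) 3 = (((s.length + 2) / 3 : Nat) : Int) := by
    show Int.fdiv _ _ = _
    rw [Int.fdiv_eq_ediv_of_nonneg _ (by positivity)]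
    push_cast
    omega
  show (PySem.List.pyRange 0 (PySem.Int.floordiv ((s.length : Int) + 2) 3) 1).foldl _ [] = _
  rw [hN, PySem.List.pyRange_zero_natCast, List.foldl_map, PySem.List.foldl_append_eq_flatMap]
  rw [List.nil_append]
  refine List.flatMap_congr ?_
  intro k _
  show (if (k : Int) > 0 then _ else _) = pvG s k
  have hsl : PySem.List.slice s (some (3 * (k : Int))) (some (3 * (k : Int) + 3)) = (s.drop (3 * k)).take 3 := by
    have h1 : (3 * (k : Int)) = ((3 * k : Nat) : Int) := by push_cast; ring
    have h2 : (3 * (k : Int) + 3) = ((3 * k + 3 : Nat) : Int) := by push_cast; ring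
    rw [h2, h1, PySem.List.slice_natCast]
    have h3 : 3 * k + 3 - 3 * k = 3 := by omega
    rw [h3]
  rw [hsl]
  unfold pvG
  by_cases hk : 0 < k
  · rw [if_pos (by exact_mod_cast hk), if_pos hk]
    have hc : PySem.Int.mod (3 * (k : Int)) 7 = PySem.Int.mod ((3 * k : Nat) : Int) 7 := by
      congr 1
    simp only [pvConn]
    norm_num [hc]
  · rw [if_neg (by exact_mod_cast hk), if_neg hk]

-- B's chunked loop, read off one position
lemma pvB_chunks_elem (s : List String) : ∀ (n k0 : Nat),
    s.length ≤ 3 * (k0 + n) → (n = 0 ∨ 3 * (k0 + n) ≤ s.length + 2) → ∀ (j : Nat),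
    ((List.range' k0 n).flatMap (pvG s))[j]? =
      (s.drop (3 * k0))[j]?.map
        (fun t => if (3 * k0 + j) % 3 = 0 ∧ 0 < 3 * k0 + j then pvConn ((3 * k0 + j : Nat) : Int) ++ ", " ++ t else t) := by
  intro n
  induction n with
  | zero =>
    intro k0 hlo _ j
    have hd : s.drop (3 * k0) = [] := List.drop_eq_nil_of_le (by omega)
    simp [hd]
  | succ n ih =>
    intro k0 hlo hhi j
    have hhi' : 3 * (k0 + (n + 1)) ≤ s.length + 2 := by
      rcases hhi with h | h
      · omega
      · exact h
    have hne : s.drop (3 * k0) ≠ [] := by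
      intro h
      have := congrArg List.length h
      simp at this
      omega
    obtain ⟨a, rest1, hd⟩ := List.exists_cons_of_ne_nil hne
    have hdlen : rest1.length = s.length - 3 * k0 - 1 := by
      have := congrArg List.length hd
      simp at this
      omega
    have hchunk : pvG s k0 = (if 0 < k0 then pvConn ((3 * k0 : Nat) : Int) ++ ", " ++ a else a) :: rest1.take 2 := by
      unfold pvG
      rw [hd]
      simp only [List.take_succ_cons, List.headD_cons, List.tail_cons]
      split_ifs with hk
      · rfl
      · rfl
    have hdrop3 : s.drop (3 * (k0 + 1)) = rest1.drop 2 := by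
      have h1 : 3 * (k0 + 1) = 3 * k0 + 3 := by omega
      rw [h1, ← List.drop_drop, hd]
      simp [List.drop_succ_cons]
    rw [List.range'_succ, List.flatMap_cons, hchunk, hd]
    match j with
    | 0 =>
      rw [List.getElem?_append_left (by simp)]
      simp only [List.getElem?_cons_zero, Nat.add_zero, Option.map_some]
      split_ifs with h1 h2 h2 <;> first
        | rfl
        | (exfalso; omega)
    | 1 =>
      by_cases hr : 1 ≤ rest1.length
      · rw [List.getElem?_append_left (by simp; omega)]
        simp only [List.getElem?_cons_succ]
        rw [List.getElem?_take_of_lt (by omega)]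
        rw [List.getElem?_eq_getElem (by omega : 0 < rest1.length)]
        simp only [Option.map_some]
        rw [if_neg (by omega)]
      · have h0 : rest1 = [] := List.eq_nil_of_length_eq_zero (by omega)
        subst h0
        rw [List.getElem?_append_right (by simp)]
        rw [ih (k0 + 1) (by simp at hdlen; omega) (by omega) _]
        simp [hdrop3]
    | 2 =>
      by_cases hr : 2 ≤ rest1.length
      · rw [List.getElem?_append_left (by simp; omega)]
        simp only [List.getElem?_cons_succ]
        rw [List.getElem?_take_of_lt (by omega)]
        rw [List.getElem?_eq_getElem (by omega : 1 < rest1.length)]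
        simp only [Option.map_some]
        rw [if_neg (by omega)]
      · rw [List.getElem?_append_right (by simp only [List.length_cons, List.length_take]; omega)]
        rw [ih (k0 + 1) (by omega) (by omega) _]
        have hrd : rest1.drop 2 = [] := List.drop_eq_nil_of_le (by omega)
        rw [hdrop3, hrd]
        have h2' : (a :: rest1)[2]? = none := List.getElem?_eq_none (by simp; omega)
        rw [h2']
        simp only [List.length_cons, List.length_take]
        simp
    | (t + 3) =>
      rw [List.getElem?_append_right (by simp only [List.length_cons, List.length_take]; omega)]
      rw [ih (k0 + 1) (by omega) (by omega) _]
      rw [hdrop3]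
      by_cases hr : 2 ≤ rest1.length
      · have hL : ((if 0 < k0 then pvConn ((3 * k0 : Nat) : Int) ++ ", " ++ a else a) :: rest1.take 2).length = 3 := by
          simp; omega
        rw [hL]
        have h1 : t + 3 - 3 = t := by omega
        rw [h1]
        have hidx : (a :: rest1)[t + 3]? = (rest1.drop 2)[t]? := by
          rw [List.getElem?_drop]
          simp only [List.getElem?_cons_succ]
          congr 1
          omega
        rw [hidx]
        have harg : 3 * (k0 + 1) + t = 3 * k0 + (t + 3) := by omega
        rw [harg]
      · have hrd : rest1.drop 2 = [] := List.drop_eq_nil_of_le (by omega)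
        rw [hrd]
        have h2' : (a :: rest1)[t + 3]? = none := List.getElem?_eq_none (by simp; omega)
        rw [h2']
        simp

lemma pvB_getElem (s : List String) (j : Nat) :
    (adjust_connectors_alt s)[j]? =
      s[j]?.map (fun t => if j % 3 = 0 ∧ 0 < j then pvConn (j : Int) ++ ", " ++ t else t) := by
  rw [pvB_eq_flatMap, List.range_eq_range']
  rw [pvB_chunks_elem s ((s.length + 2) / 3) 0 (by omega) (by omega) j]
  simp

-- ===== VERDICT (by name: the statement is the Claim_ definition above) =====
theorem adjust_connectors_spec : Claim_equal_adjust_connectors := by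
  intro s _
  unfold Spec_adjust_connectors
  refine List.ext_getElem? fun j => ?_
  rw [pvA_getElem, pvB_getElem]
  by_cases hj : j < s.length
  · rw [List.getElem?_eq_getElem hj]
    simp only [Option.map_some]
    have hmod : PySem.Int.mod (j : Int) 3 = Int.fmod (j : Int) 3 := rfl
    rw [hmod, Int.fmod_eq_emod_of_nonneg _ (by norm_num)]
    split_ifs with h1 h2 h2 <;> first
      | rfl
      | (exfalso; omega)
  · rw [List.getElem?_eq_none (by omega)]
    simp
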